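-- pv_equiv track=rewrite | github.com/pelavarre/xshverb | bin/xshverb.py | scrape_closing
-- ===== SOURCE A (Python) =====
-- import textwrap
--
-- def scrape_closing(epilog: str | None) -> str:
--     """Pick out the last Graf of the Epilog, minus its Top Line"""
--
--     text = epilog if epilog else ""
--     lines = text.splitlines()
--
--     indices = list(_ for _ in range(len(lines)) if lines[_])  # drops empty Lines
--     indices = list(_ for _ in indices if not lines[_].startswith(" "))  # finds Ttop Lines
--
--     closing = ""
--     if indices:
--         index = indices[-1] + 1
--         join = "\n".join(lines[index:])  # last Graf, minus its Top Line
--         dedent = textwrap.dedent(join)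
--         closing = dedent.strip()
--
--     return closing  # maybe empty
-- ===== SOURCE B (Python) =====
-- def scrape_closing(epilog: "str | None") -> str:
--     """Pick out the last Graf of the Epilog, minus its Top Line"""
--
--     text = epilog if epilog else ""
--
--     tail = None  # the lines below the most recent Top Line, if one was seen
--     for line in text.splitlines():
--         if line and not line.startswith(" "):
--             tail = []  # a new Top Line restarts the closing Graf
--         elif tail is not None:
--             tail.append(line)
--
--     if tail is None:
--         return ""
--
--     # dedent the kept lines in place of textwrap: blank out whitespace-only
--     # lines, then drop the common leading space/tab prefix, then strip
--     kept = [line if line.lstrip(" \t") else "" for line in tail]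
--     indents = [line[: len(line) - len(line.lstrip(" \t"))] for line in kept if line]
--
--     margin = indents[0] if indents else ""
--     for indent in indents[1:]:
--         j = 0
--         while j < len(margin) and j < len(indent) and margin[j] == indent[j]:
--             j += 1
--         margin = margin[:j]
--
--     return "\n".join(line[len(margin):] for line in kept).strip()
-- ===== Notes on version B (the rewrite author's own statement) =====
-- stated objective: alternative
-- what changed: Replaces A's two filtered index-list passes plus negative indexing and the textwrap.dedent call with one forward fold that restarts an accumulator at each top line, followed by an inline dedent (blank whitespace-only lines, fold a character-wise common-prefix margin, slice it off).
import Mathlib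
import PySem

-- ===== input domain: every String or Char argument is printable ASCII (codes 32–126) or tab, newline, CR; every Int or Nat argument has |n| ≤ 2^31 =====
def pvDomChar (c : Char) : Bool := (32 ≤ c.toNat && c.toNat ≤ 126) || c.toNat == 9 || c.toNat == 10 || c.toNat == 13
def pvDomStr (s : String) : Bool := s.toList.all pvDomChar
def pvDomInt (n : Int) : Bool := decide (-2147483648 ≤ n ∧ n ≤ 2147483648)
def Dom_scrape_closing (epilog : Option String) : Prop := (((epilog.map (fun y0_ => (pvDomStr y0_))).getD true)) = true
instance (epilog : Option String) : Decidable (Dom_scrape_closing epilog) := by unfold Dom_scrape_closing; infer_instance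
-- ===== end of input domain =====

-- B replaces A's two filtered index-list passes and the textwrap.dedent call with one
-- forward fold that restarts an accumulator at each top line, plus an inline dedent
-- (objective: alternative decomposition, same cost).

-- ===== PORT A =====
-- A-side helper: port of stdlib textwrap.dedent (exact for the '\r'-free text A feeds
-- it: whitespace-only lines are cleared, margin = longest common space/tab leading
-- prefix of the remaining lines, then the margin is stripped)
def pvIsWs (c : Char) : Bool := c == ' ' || c == '\t'

def pvLCP : List Char → List Char → List Char
  | x :: xs, y :: ys => if x == y then x :: pvLCP xs ys else []
  | _, _ => []

-- one step of textwrap.dedent's margin loop (branches in the source's order)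
def pvMarginStep (margin : Option (List Char)) (indent : List Char) : Option (List Char) :=
  match margin with
  | none => some indent
  | some m =>
    if m.isPrefixOf indent then some m
    else if indent.isPrefixOf m then some indent
    else some (pvLCP m indent)

def pvDedent (text : String) : String :=
  let lines := (PySem.Str.split? text "\n").getD []          -- text.split('\n'); sep ≠ "" so some
  let lines1 := lines.map (fun l => if l ≠ "" ∧ l.toList.all pvIsWs then "" else l)  -- _whitespace_only_re.sub('', text)
  let indents := (lines1.filter (fun l => !(l == ""))).map (fun l => l.toList.takeWhile pvIsWs)  -- _leading_whitespace_re.findall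
  match indents.foldl pvMarginStep none with
  | none => PySem.Str.join "\n" lines1
  | some m =>
    if m = [] then PySem.Str.join "\n" lines1                -- 'if margin:' — empty margin strips nothing
    else PySem.Str.join "\n" (lines1.map (fun l =>           -- re.sub(r'(?m)^' + margin, '', text)
      if m.isPrefixOf l.toList then String.ofList (l.toList.drop m.length) else l))

def scrape_closing (epilog : Option String) : String :=
  let text := match epilog with                              -- epilog if epilog else ""
    | some s => if s == "" then "" else s
    | none => ""
  let lines := PySem.Str.splitlines text
  let indices := (List.range lines.length).filter (fun i => !(lines.getD i "" == ""))
  let indices2 := indices.filter (fun i => !(PySem.Str.startswith (lines.getD i "") " "))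
  match indices2.getLast? with                               -- 'if indices:' + indices[-1]
  | none => ""
  | some last =>
    let index := last + 1
    let join := PySem.Str.join "\n" (lines.drop index)       -- lines[index:] with index ≥ 0
    PySem.Str.strip (pvDedent join)

-- ===== PORT B =====
-- the loop body: restart the tail at a Top Line, else append to it if it exists
def pvStep (tail : Option (List String)) (line : String) : Option (List String) :=
  if line ≠ "" ∧ PySem.Str.startswith line " " = false then some []
  else match tail with
    | some t => some (t ++ [line])                           -- tail.append(line)
    | none => none

def pvLstripWT (cs : List Char) : List Char :=               -- line.lstrip(" \t")
  cs.dropWhile (fun c => c == ' ' || c == '\t')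

def pvCPLen : List Char → List Char → Nat                    -- the while loop counting equal leading chars
  | a :: as, b :: bs => if a == b then pvCPLen as bs + 1 else 0
  | _, _ => 0

def scrape_closing_alt (epilog : Option String) : String :=
  let text := match epilog with                              -- epilog if epilog else ""
    | some s => if s == "" then "" else s
    | none => ""
  match (PySem.Str.splitlines text).foldl pvStep none with
  | none => ""                                               -- no Top Line seen
  | some tail =>
    let kept := tail.map (fun line => if pvLstripWT line.toList ≠ [] then line else "")
    let indents := (kept.filter (fun line => !(line == ""))).map
        (fun line => line.toList.take (line.toList.length - (pvLstripWT line.toList).length))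
    let margin := match indents with
      | [] => ([] : List Char)
      | m0 :: rest => rest.foldl (fun m ind => m.take (pvCPLen m ind)) m0
    PySem.Str.strip (PySem.Str.join "\n"
      (kept.map (fun line => String.ofList (line.toList.drop margin.length))))

-- ===== PRECONDITION & SPEC =====
def Spec_scrape_closing (epilog : Option String) (out : String) : Prop := out = scrape_closing_alt epilog
instance (epilog : Option String) (out : String) : Decidable (Spec_scrape_closing epilog out) := by unfold Spec_scrape_closing; infer_instance

-- ===== CLAIM (what is proved, stated in full; the proofs are below) =====
def Claim_equal_scrape_closing : Prop := ∀ (epilog : Option String), Dom_scrape_closing epilog → Spec_scrape_closing epilog (scrape_closing epilog)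

-- ===== LEMMAS AND PROOFS =====

-- ---- 1. splitlines produces newline-free lines ----
theorem pv_acc_inv {cur : List Char} {acc : List (List Char)}
    (hcur : '\n' ∉ cur) (hacc : ∀ l ∈ acc, '\n' ∉ l) :
    ∀ l ∈ cur.reverse :: acc, '\n' ∉ l := by
  intro l hl
  rcases List.mem_cons.mp hl with h | h
  · subst h; simpa using hcur
  · exact hacc l h

theorem pv_go_no_break (isB : Char → Bool) (hnl : isB '\n' = true)
    (s cur acc : _) (hcur : '\n' ∉ cur) (hacc : ∀ l ∈ acc, '\n' ∉ l) :
      ∀ l ∈ PySem.Chars.splitlines.go isB s cur acc, '\n' ∉ l := by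
  fun_induction PySem.Chars.splitlines.go isB s cur acc
  · intro l hl
    exact hacc l (List.mem_reverse.mp hl)
  · intro l hl
    exact pv_acc_inv hcur hacc l (List.mem_reverse.mp hl)
  · rename_i ih
    exact ih (by simp) (pv_acc_inv hcur hacc)
  · rename_i ih
    exact ih (by simp) (pv_acc_inv hcur hacc)
  · rename_i c rest x h ih
    refine ih ?_ hacc
    intro hmem
    rcases List.mem_cons.mp hmem with h1 | h1
    · exact h (h1 ▸ hnl)
    · exact hcur h1

theorem pv_nl_not_mem_splitlines (cs : List Char) :
    ∀ l ∈ PySem.Chars.splitlines cs, '\n' ∉ l := by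
  intro l hl
  unfold PySem.Chars.splitlines at hl
  exact pv_go_no_break _ (by decide) cs [] [] (by simp) (by simp) l hl

-- ---- 2. splitting the '\n'-join of newline-free lines gives them back ----
theorem pv_go_cons (f : Nat) (c : Char) (rest cur : List Char) (acc : List (List Char)) :
    PySem.Chars.splitOn.go ['\n'] (f+1) (c :: rest) cur acc =
      if c = '\n'
      then PySem.Chars.splitOn.go ['\n'] f rest [] (cur.reverse :: acc)
      else PySem.Chars.splitOn.go ['\n'] f rest (c :: cur) acc := by
  simp only [PySem.Chars.splitOn.go, List.isPrefixOf,
    Bool.and_true, List.length_cons, List.length_nil, List.drop_succ_cons, List.drop_zero]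
  by_cases h : c = '\n'
  · simp [h]
  · simp only [beq_iff_eq]
    rw [if_neg (fun hc => h hc.symm), if_neg h]

theorem pv_go_nil (f : Nat) (cur : List Char) (acc : List (List Char)) :
    PySem.Chars.splitOn.go ['\n'] f [] cur acc = (cur.reverse :: acc).reverse := by
  cases f <;> simp [PySem.Chars.splitOn.go]

theorem pv_go_skip (cs : List Char) (h : '\n' ∉ cs) :
    ∀ (fuel : Nat) (l cur : List Char) (acc : List (List Char)), cs.length ≤ fuel →
      PySem.Chars.splitOn.go ['\n'] fuel (cs ++ l) cur acc =
        PySem.Chars.splitOn.go ['\n'] (fuel - cs.length) l (cs.reverse ++ cur) acc := by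
  induction cs with
  | nil => intro fuel l cur acc _; simp
  | cons c cs ih =>
    intro fuel l cur acc hf
    simp only [List.mem_cons, not_or] at h
    simp only [List.length_cons] at hf
    obtain ⟨f, rfl⟩ : ∃ f, fuel = f + 1 := ⟨fuel - 1, by omega⟩
    rw [List.cons_append, pv_go_cons, if_neg (fun hc => h.1 hc.symm)]
    rw [ih h.2 f l (c :: cur) acc (by omega)]
    simp only [List.reverse_cons, List.append_assoc, List.cons_append, List.nil_append,
      List.length_cons]
    congr 1
    omega

theorem pv_go_join (ls : List (List Char)) (hne : ls ≠ []) (h : ∀ l ∈ ls, '\n' ∉ l) :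
    ∀ (acc : List (List Char)) (fuel : Nat), (PySem.Chars.join ['\n'] ls).length ≤ fuel →
      PySem.Chars.splitOn.go ['\n'] fuel (PySem.Chars.join ['\n'] ls) [] acc = acc.reverse ++ ls := by
  induction ls with
  | nil => exact absurd rfl hne
  | cons x t ih =>
    intro acc fuel hf
    cases t with
    | nil =>
      have hx : '\n' ∉ x := h x (by simp)
      have hj : PySem.Chars.join ['\n'] [x] = x := PySem.Chars.join_singleton _ _
      rw [hj] at hf ⊢
      rw [← List.append_nil x, pv_go_skip x hx fuel [] [] acc (by simpa using hf), pv_go_nil]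
      simp
    | cons y t' =>
      have hx : '\n' ∉ x := h x (by simp)
      have hj : PySem.Chars.join ['\n'] (x :: y :: t') =
          x ++ '\n' :: PySem.Chars.join ['\n'] (y :: t') := by
        rw [PySem.Chars.join_cons_cons]; simp
      rw [hj] at hf ⊢
      simp only [List.length_append, List.length_cons] at hf
      rw [pv_go_skip x hx fuel _ [] acc (by omega)]
      obtain ⟨f, hfe⟩ : ∃ f, fuel - x.length = f + 1 := ⟨fuel - x.length - 1, by omega⟩
      rw [hfe, pv_go_cons, if_pos rfl]
      rw [ih (by simp) (fun l hl => h l (by simp [hl])) _ f (by omega)]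
      simp

theorem pv_splitOn_join (ls : List (List Char)) (hne : ls ≠ []) (h : ∀ l ∈ ls, '\n' ∉ l) :
    PySem.Chars.splitOn (PySem.Chars.join ['\n'] ls) ['\n'] = ls := by
  unfold PySem.Chars.splitOn
  simpa using pv_go_join ls hne h [] _ (by omega)

-- ---- 3. margin facts ----
theorem pvLCP_prefix_left (a b : List Char) : pvLCP a b <+: a := by
  induction a generalizing b with
  | nil => cases b <;> simp [pvLCP]
  | cons x xs ih =>
    cases b with
    | nil => simp [pvLCP]
    | cons y ys =>
      simp only [pvLCP]
      split
      · simp [List.cons_prefix_cons, ih ys]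
      · simp

theorem pvLCP_prefix_right (a b : List Char) : pvLCP a b <+: b := by
  induction a generalizing b with
  | nil => cases b <;> simp [pvLCP]
  | cons x xs ih =>
    cases b with
    | nil => simp [pvLCP]
    | cons y ys =>
      simp only [pvLCP]
      split
      · rename_i h
        rw [beq_iff_eq] at h
        subst h
        simp [List.cons_prefix_cons, ih ys]
      · simp

theorem pvLCP_of_prefix_left (a b : List Char) (h : a <+: b) : pvLCP a b = a := by
  induction a generalizing b with
  | nil => cases b <;> simp [pvLCP]
  | cons x xs ih =>
    cases b with
    | nil => simp at h
    | cons y ys =>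
      obtain ⟨hxy, h2⟩ := by simpa using h
      simp [pvLCP, hxy, ih ys h2]

theorem pvLCP_of_prefix_right (a b : List Char) (h : b <+: a) : pvLCP a b = b := by
  induction a generalizing b with
  | nil => cases b <;> simp_all [pvLCP]
  | cons x xs ih =>
    cases b with
    | nil => simp [pvLCP]
    | cons y ys =>
      obtain ⟨hxy, h2⟩ := by simpa using h
      simp [pvLCP, hxy.symm, ih ys h2]

theorem pvMarginStep_some (m i : List Char) : pvMarginStep (some m) i = some (pvLCP m i) := by
  simp only [pvMarginStep]
  split
  · rename_i h; rw [pvLCP_of_prefix_left m i (List.isPrefixOf_iff_prefix.mp h)]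
  · split
    · rename_i h; rw [pvLCP_of_prefix_right m i (List.isPrefixOf_iff_prefix.mp h)]
    · rfl

theorem pvTake_cpLen (m i : List Char) : m.take (pvCPLen m i) = pvLCP m i := by
  induction m generalizing i with
  | nil => cases i <;> simp [pvCPLen, pvLCP]
  | cons x xs ih =>
    cases i with
    | nil => simp [pvCPLen, pvLCP]
    | cons y ys =>
      simp only [pvCPLen, pvLCP]
      split
      · simp [List.take_succ_cons, ih ys]
      · simp

theorem pv_foldl_marginStep (t : List (List Char)) (m : List Char) :
    t.foldl pvMarginStep (some m) = some (t.foldl pvLCP m) := by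
  induction t generalizing m with
  | nil => rfl
  | cons i t ih => simp [List.foldl_cons, pvMarginStep_some, ih]

theorem pv_foldl_lcp_prefix (t : List (List Char)) (m : List Char) :
    t.foldl pvLCP m <+: m ∧ ∀ x ∈ t, t.foldl pvLCP m <+: x := by
  induction t generalizing m with
  | nil => simp
  | cons i t ih =>
    obtain ⟨h1, h2⟩ := ih (pvLCP m i)
    refine ⟨h1.trans (pvLCP_prefix_left m i), ?_⟩
    intro x hx
    rcases List.mem_cons.mp hx with rfl | hx
    · exact h1.trans (pvLCP_prefix_right m x)
    · exact h2 x hx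

theorem pv_foldl_cpLen (t : List (List Char)) (m : List Char) :
    t.foldl (fun m ind => m.take (pvCPLen m ind)) m = t.foldl pvLCP m := by
  induction t generalizing m with
  | nil => rfl
  | cons i t ih => rw [List.foldl_cons, List.foldl_cons, pvTake_cpLen]; exact ih _

-- ---- 4. the forward fold finds the last top-line index ----
def pvTop (line : String) : Bool := !(line == "") && !(PySem.Str.startswith line " ")

theorem pv_filter_filter (lines : List String) :
    (((List.range lines.length).filter (fun i => !(lines.getD i "" == ""))).filter
        (fun i => !(PySem.Str.startswith (lines.getD i "") " "))) =
      (List.range lines.length).filter (fun i => pvTop (lines.getD i "")) := by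
  rw [List.filter_filter]
  apply List.filter_congr
  intro i _
  simp [pvTop, Bool.and_comm]

theorem pv_foldl_step (lines : List String) :
    lines.foldl pvStep none =
      (((List.range lines.length).filter (fun i => pvTop (lines.getD i ""))).getLast?).map
        (fun i => lines.drop (i + 1)) := by
  induction lines using List.reverseRecOn with
  | nil => simp
  | append_singleton ls l ih =>
    rw [List.foldl_append, List.foldl_cons, List.foldl_nil]
    have hlen : (ls ++ [l]).length = ls.length + 1 := by simp
    rw [hlen, List.range_succ, List.filter_append]
    have hgetD : ∀ i < ls.length, (ls ++ [l]).getD i "" = ls.getD i "" := by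
      intro i hi
      simp [List.getD_eq_getElem?_getD, List.getElem?_append_left hi]
    have hfilter : (List.range ls.length).filter (fun i => pvTop ((ls ++ [l]).getD i "")) =
        (List.range ls.length).filter (fun i => pvTop (ls.getD i "")) := by
      apply List.filter_congr
      intro i hi
      rw [hgetD i (List.mem_range.mp hi)]
    rw [hfilter]
    by_cases htop : pvTop l = true
    · have : (List.filter (fun i => pvTop ((ls ++ [l]).getD i "")) [ls.length]) = [ls.length] := by
        simp [htop]
      rw [this, List.getLast?_concat]
      have hstep : pvStep (ls.foldl pvStep none) l = some [] := by
        unfold pvStep pvTop at *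
        simp only [Bool.and_eq_true, Bool.not_eq_true'] at htop
        rw [if_pos ⟨by simpa using htop.1, by simpa using htop.2⟩]
      rw [hstep]
      simp
    · have : (List.filter (fun i => pvTop ((ls ++ [l]).getD i "")) [ls.length]) = [] := by
        simp [htop]
      rw [this, List.append_nil]
      have hcond : ¬ (l ≠ "" ∧ PySem.Str.startswith l " " = false) := by
        rintro ⟨h1, h2⟩
        apply htop
        unfold pvTop
        rw [h2]
        simp [h1]
      have hstep : pvStep (ls.foldl pvStep none) l = (ls.foldl pvStep none).map (fun t => t ++ [l]) := by
        have hall : ∀ o, pvStep o l = o.map (fun t => t ++ [l]) := by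
          intro o
          unfold pvStep
          rw [if_neg hcond]
          cases o <;> rfl
        exact hall _
      rw [hstep, ih]
      cases hl : ((List.range ls.length).filter (fun i => pvTop (ls.getD i ""))).getLast? with
      | none => simp
      | some i =>
        have hi : i < ls.length :=
          List.mem_range.mp (List.mem_of_mem_filter (List.mem_of_getLast? hl))
        simp only [Option.map_some]
        congr 1
        rw [List.drop_append_of_le_length (by omega)]

-- ---- 5. small string/list facts ----
theorem pv_fg (l : String) :
    (if l ≠ "" ∧ l.toList.all pvIsWs then "" else l) =
      (if pvLstripWT l.toList ≠ [] then l else "") := by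
  unfold pvLstripWT
  by_cases hall : l.toList.all (fun c => c == ' ' || c == '\t') = true
  · have hd : l.toList.dropWhile (fun c => c == ' ' || c == '\t') = [] :=
      List.dropWhile_eq_nil_iff.mpr (fun x hx => by
        have := List.all_eq_true.mp hall x hx; simpa using this)
    rw [hd]
    by_cases he : l = ""
    · simp [he]
    · rw [if_pos ⟨he, by simpa [pvIsWs] using hall⟩, if_neg (by simp)]
  · have hd : l.toList.dropWhile (fun c => c == ' ' || c == '\t') ≠ [] := by
      intro hc
      exact hall (List.all_eq_true.mpr (fun x hx => by
        simpa using List.dropWhile_eq_nil_iff.mp hc x hx))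
    rw [if_pos hd, if_neg (fun hc => hall (by simpa [pvIsWs] using hc.2))]

theorem pv_take_sub (p : Char → Bool) (cs : List Char) :
    cs.take (cs.length - (cs.dropWhile p).length) = cs.takeWhile p := by
  induction cs with
  | nil => simp
  | cons c cs ih =>
    by_cases h : p c
    · have hle : (cs.dropWhile p).length ≤ cs.length := List.length_dropWhile_le _ _
      simp only [List.dropWhile_cons, h, if_true, List.takeWhile_cons, List.length_cons]
      have : cs.length + 1 - (cs.dropWhile p).length = (cs.length - (cs.dropWhile p).length) + 1 := by omega
      rw [this, List.take_succ_cons, ih]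
    · simp [h]

-- ---- 6. the dedent bodies agree on a list of newline-free lines ----
theorem pv_strip_dedent (rows : List String) (hnl : ∀ r ∈ rows, '\n' ∉ r.toList) :
    PySem.Str.strip (pvDedent (PySem.Str.join "\n" rows)) =
      (let kept := rows.map (fun line => if pvLstripWT line.toList ≠ [] then line else "")
       let indents := (kept.filter (fun line => !(line == ""))).map
           (fun line => line.toList.take (line.toList.length - (pvLstripWT line.toList).length))
       let margin := match indents with
         | [] => ([] : List Char)
         | m0 :: rest => rest.foldl (fun m ind => m.take (pvCPLen m ind)) m0
       PySem.Str.strip (PySem.Str.join "\n"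
         (kept.map (fun line => String.ofList (line.toList.drop margin.length))))) := by
  by_cases hrows : rows = []
  · subst hrows; rfl
  · have hsplit : PySem.Str.split? (PySem.Str.join "\n" rows) "\n" = some rows := by
      unfold PySem.Str.split? PySem.Str.join PySem.Chars.split?
      rw [if_neg (by simp)]
      simp only [String.toList_ofList]
      have hsep : ("\n" : String).toList = ['\n'] := rfl
      rw [hsep]
      rw [pv_splitOn_join (rows.map String.toList) (by simpa using hrows)
        (by intro l hl; obtain ⟨r, hr, rfl⟩ := List.mem_map.mp hl; exact hnl r hr)]
      simp [List.map_map, Function.comp_def, String.ofList_toList]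
    unfold pvDedent
    rw [hsplit]
    simp only [Option.getD_some]
    rw [show (fun l => if l ≠ "" ∧ l.toList.all pvIsWs then "" else l) =
          (fun line => if pvLstripWT line.toList ≠ [] then line else "") from funext pv_fg]
    have hind : (fun (line : String) =>
          line.toList.take (line.toList.length - (pvLstripWT line.toList).length))
        = (fun (l : String) => l.toList.takeWhile pvIsWs) := by
      funext l
      unfold pvLstripWT
      rw [pv_take_sub]
      rfl
    simp only [hind]
    set kept := rows.map (fun line => if pvLstripWT line.toList ≠ [] then line else "") with hkept
    set indents := (kept.filter (fun line => !(line == ""))).map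
        (fun l => l.toList.takeWhile pvIsWs) with hindents
    have hjoin0 : PySem.Str.join "\n" kept =
        PySem.Str.join "\n" (kept.map (fun line => String.ofList (line.toList.drop 0))) := by
      simp [String.ofList_toList]
    cases hi : indents with
    | nil =>
      simp only [List.foldl_nil]
      rw [List.length_nil]  -- margin = [], drop 0
      exact congrArg PySem.Str.strip hjoin0
    | cons m0 rest =>
      have hA : (m0 :: rest).foldl pvMarginStep none = some (rest.foldl pvLCP m0) := by
        rw [List.foldl_cons]
        exact pv_foldl_marginStep rest m0
      rw [hA]
      dsimp only
      rw [pv_foldl_cpLen]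
      by_cases hm : rest.foldl pvLCP m0 = []
      · rw [if_pos hm, hm, List.length_nil]
        exact congrArg PySem.Str.strip hjoin0
      · rw [if_neg hm]
        refine congrArg PySem.Str.strip (congrArg (PySem.Str.join "\n") ?_)
        apply List.map_congr_left
        intro l hl
        by_cases hl0 : l = ""
        · subst hl0
          rw [if_neg (by simpa using (fun hpre => hm (List.prefix_nil.mp hpre)))]
          have he : ("" : String).toList = [] := rfl
          rw [he, List.drop_nil]
        · have hmem : l.toList.takeWhile pvIsWs ∈ indents := by
            rw [hindents]
            exact List.mem_map_of_mem (List.mem_filter.mpr ⟨hl, by simp [hl0]⟩)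
          rw [hi] at hmem
          have hpre : rest.foldl pvLCP m0 <+: l.toList := by
            have hthis : rest.foldl pvLCP m0 <+: l.toList.takeWhile pvIsWs := by
              rcases List.mem_cons.mp hmem with he | hmem2
              · rw [he]; exact (pv_foldl_lcp_prefix rest m0).1
              · exact (pv_foldl_lcp_prefix rest m0).2 _ hmem2
            exact hthis.trans (List.takeWhile_prefix _)
          rw [if_pos (List.isPrefixOf_iff_prefix.mpr hpre)]

-- ===== VERDICT (by name: the statement is the Claim_ definition above) =====
theorem scrape_closing_spec : Claim_equal_scrape_closing := by
  intro epilog _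
  unfold Spec_scrape_closing
  simp only [scrape_closing, scrape_closing_alt]
  rw [pv_filter_filter, pv_foldl_step]
  set text := (match epilog with
    | some s => if s == "" then "" else s
    | none => "") with htext
  set lines := PySem.Str.splitlines text with hlines
  cases h : ((List.range lines.length).filter (fun i => pvTop (lines.getD i ""))).getLast? with
  | none => rfl
  | some i =>
    simp only [Option.map_some]
    have hnl : ∀ r ∈ lines.drop (i + 1), '\n' ∉ r.toList := by
      intro r hr
      have hr2 : r ∈ lines := List.mem_of_mem_drop hr
      rw [hlines] at hr2
      unfold PySem.Str.splitlines at hr2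
      obtain ⟨c, hc, rfl⟩ := List.mem_map.mp hr2
      rw [String.toList_ofList]
      exact pv_nl_not_mem_splitlines _ c hc
    exact pv_strip_dedent (lines.drop (i + 1)) hnl
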